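-- pv_equiv track=rewrite | github.com/pokemoncentral/wiki-util | bot/add-lpa-learnlist-subpages.py | split_moves
-- ===== SOURCE A (Python) =====
-- def split_moves(lines):
--     """Return a Tuple[List[str], List[str]]
--     These are lists of moves learned by level and tutor respectively
--     """
--     res = []
--     for fline in ("Level:", "Move Shop:"):
--         try:
--             idx = lines.index(fline) + 1
--             moves = []
--             while idx < len(lines) and lines[idx].startswith("- "):
--                 moves.append(lines[idx])
--                 idx += 1
--             res.append(moves)
--         except ValueError:
--             res.append([])
--     # Reorder res to have the expected order
--     return tuple(res)
-- ===== SOURCE B (Python) =====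
-- def split_moves(lines):
--     """Return a Tuple[List[str], List[str]]
--     These are lists of moves learned by level and tutor respectively
--     """
--     level, tutor = [], []
--     seen_level = seen_tutor = False
--     current = None  # the list currently being collected into, or None
--     for line in lines:
--         if current is not None and line.startswith("- "):
--             current.append(line)
--             continue
--         current = None
--         if line == "Level:" and not seen_level:
--             seen_level, current = True, level
--         elif line == "Move Shop:" and not seen_tutor:
--             seen_tutor, current = True, tutor
--     return (level, tutor)
-- ===== Notes on version B (the rewrite author's own statement) =====
-- stated objective: alternative
-- what changed: Replaced the two list.index lookups plus separate while-scans with a single linear pass keeping a 'currently collecting' state and first-occurrence seen flags.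
import Mathlib
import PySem

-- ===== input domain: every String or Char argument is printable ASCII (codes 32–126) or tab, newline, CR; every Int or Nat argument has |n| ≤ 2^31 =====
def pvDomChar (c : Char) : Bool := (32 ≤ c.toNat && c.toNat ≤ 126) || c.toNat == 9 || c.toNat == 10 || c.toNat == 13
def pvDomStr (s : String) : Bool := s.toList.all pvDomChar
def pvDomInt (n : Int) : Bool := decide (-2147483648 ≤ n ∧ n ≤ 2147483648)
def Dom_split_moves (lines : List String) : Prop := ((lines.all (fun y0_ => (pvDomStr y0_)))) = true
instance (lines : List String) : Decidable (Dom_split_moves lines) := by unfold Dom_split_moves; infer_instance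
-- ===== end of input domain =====

-- B replaces A's per-marker index lookup + while-scan with one linear pass carrying a
-- 'currently collecting' state and first-occurrence flags (objective: alternative decomposition).

-- ===== PORT A =====
-- the inner 'while idx < len(lines) and lines[idx].startswith("- ")' loop
def pvCollectA (lines : List String) (idx : Nat) (moves : List String) : List String :=
  if h : idx < lines.length then
    if PySem.Str.startswith lines[idx] "- " then
      pvCollectA lines (idx + 1) (moves ++ [lines[idx]])
    else moves
  else moves
termination_by lines.length - idx

-- one iteration of A's 'for fline in ("Level:", "Move Shop:")' body (try/except → match on index?)
def pvSectionA (lines : List String) (fline : String) : List String :=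
  match PySem.List.index? lines fline with
  | some i => pvCollectA lines (i + 1) []
  | none => []

def split_moves (lines : List String) : List String × List String :=
  (pvSectionA lines "Level:", pvSectionA lines "Move Shop:")

-- ===== PORT B =====
-- state = (level, tutor, seen_level, seen_tutor, current); Python's 'current' list reference
-- is ported as a tag: some true = the level list, some false = the tutor list, none = not collecting
def pvStepB (st : List String × List String × Bool × Bool × Option Bool) (line : String) :
    List String × List String × Bool × Bool × Option Bool :=
  match st with
  | (accL, accT, seenL, seenT, cur) =>
    if cur.isSome && PySem.Str.startswith line "- " then
      match cur with
      | some true => (accL ++ [line], accT, seenL, seenT, cur)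
      | _ => (accL, accT ++ [line], seenL, seenT, cur)
    else if line == "Level:" && !seenL then (accL, accT, true, seenT, some true)
    else if line == "Move Shop:" && !seenT then (accL, accT, seenL, true, some false)
    else (accL, accT, seenL, seenT, none)

def split_moves_alt (lines : List String) : List String × List String :=
  let st := lines.foldl pvStepB ([], [], false, false, none)
  (st.1, st.2.1)

-- ===== PRECONDITION & SPEC =====
def Spec_split_moves (lines : List String) (out : List String × List String) : Prop := out = split_moves_alt lines
instance (lines : List String) (out : List String × List String) : Decidable (Spec_split_moves lines out) := by unfold Spec_split_moves; infer_instance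

-- ===== CLAIM (what is proved, stated in full; the proofs are below) =====
def Claim_equal_split_moves : Prop := ∀ (lines : List String), Dom_split_moves lines → Spec_split_moves lines (split_moves lines)

-- ===== LEMMAS AND PROOFS =====

-- the move-line predicate
def pvPred (line : String) : Bool := PySem.Str.startswith line "- "

-- A's section result rephrased on the suffix after the first marker occurrence
def pvSec (fline : String) (lines : List String) : List String :=
  match PySem.List.index? lines fline with
  | some i => (lines.drop (i + 1)).takeWhile pvPred
  | none => []

lemma pvCollectA_eq (lines : List String) (idx : Nat) (moves : List String) :
    pvCollectA lines idx moves = moves ++ (lines.drop idx).takeWhile pvPred := by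
  generalize hgas : lines.length - idx = n
  induction n generalizing idx moves with
  | zero =>
    have h : ¬ idx < lines.length := by omega
    unfold pvCollectA
    simp [h, List.drop_eq_nil_of_le (Nat.le_of_not_lt h)]
  | succ n ih =>
    have h : idx < lines.length := by omega
    have hd : lines.drop idx = lines[idx] :: lines.drop (idx + 1) := List.drop_eq_getElem_cons h
    unfold pvCollectA
    by_cases hp : PySem.Str.startswith lines[idx] "- "
    · have hpv : pvPred lines[idx] = true := hp
      rw [dif_pos h, if_pos hp, ih (idx + 1) _ (by omega), hd, List.takeWhile_cons, if_pos hpv]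
      simp
    · have hpv : ¬ pvPred lines[idx] = true := hp
      rw [dif_pos h, if_neg hp, hd, List.takeWhile_cons, if_neg hpv]
      simp

lemma pvSectionA_eq (lines : List String) (fline : String) :
    pvSectionA lines fline = pvSec fline lines := by
  unfold pvSectionA pvSec
  cases PySem.List.index? lines fline with
  | none => rfl
  | some i => simp [pvCollectA_eq]

lemma pvSec_cons (fline l : String) (ls : List String) :
    pvSec fline (l :: ls) = if l = fline then ls.takeWhile pvPred else pvSec fline ls := by
  unfold pvSec
  by_cases h : l = fline
  · subst h; rw [PySem.List.index?_cons_self]; simp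
  · rw [PySem.List.index?_cons_of_ne ls h, if_neg h]
    cases hx : PySem.List.index? ls fline with
    | none => simp
    | some i => simp [List.drop_succ_cons]

lemma pvPred_ne_marker {l : String} (h : pvPred l = true) : l ≠ "Level:" ∧ l ≠ "Move Shop:" := by
  constructor <;> rintro rfl <;> exact absurd h (by decide)

lemma pvRunB (ls : List String) :
    ∀ (accL accT : List String) (seenL seenT : Bool) (cur : Option Bool),
      (cur = some true → seenL = true) → (cur = some false → seenT = true) →
      (ls.foldl pvStepB (accL, accT, seenL, seenT, cur)).1 =
        (match cur with
         | some true => accL ++ ls.takeWhile pvPred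
         | _ => if seenL then accL else accL ++ pvSec "Level:" ls) ∧
      (ls.foldl pvStepB (accL, accT, seenL, seenT, cur)).2.1 =
        (match cur with
         | some false => accT ++ ls.takeWhile pvPred
         | _ => if seenT then accT else accT ++ pvSec "Move Shop:" ls) := by
  induction ls with
  | nil =>
    intro accL accT seenL seenT cur hL hT
    rcases cur with _ | b
    · cases seenL <;> cases seenT <;> simp [pvSec]
    · cases b <;> cases seenL <;> cases seenT <;> simp [pvSec]
  | cons l ls ih =>
    intro accL accT seenL seenT cur hL hT
    rw [List.foldl_cons]
    have hfL : pvPred ("Level:" : String) = false := by decide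
    have hfT : pvPred ("Move Shop:" : String) = false := by decide
    by_cases hp : pvPred l
    · have hne := pvPred_ne_marker hp
      have hp' : PySem.Chars.startswith l.toList ['-', ' '] = true := by
        simpa [pvPred] using hp
      rcases cur with _ | b
      · have hstep : pvStepB (accL, accT, seenL, seenT, none) l
            = (accL, accT, seenL, seenT, none) := by
          simp [pvStepB, hne.1, hne.2]
        rw [hstep]
        obtain ⟨h1, h2⟩ := ih accL accT seenL seenT none (by simp) (by simp)
        exact ⟨by simp [h1, pvSec_cons, hne.1], by simp [h2, pvSec_cons, hne.2]⟩
      · cases b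
        · have hstep : pvStepB (accL, accT, seenL, seenT, some false) l
              = (accL, accT ++ [l], seenL, seenT, some false) := by
            simp [pvStepB, hp']
          rw [hstep]
          obtain ⟨h1, h2⟩ := ih accL (accT ++ [l]) seenL seenT (some false)
            (by simp) (fun _ => hT rfl)
          refine ⟨by simp [h1, pvSec_cons, hne.1], ?_⟩
          rw [h2, List.takeWhile_cons, if_pos hp]
          simp
        · have hstep : pvStepB (accL, accT, seenL, seenT, some true) l
              = (accL ++ [l], accT, seenL, seenT, some true) := by
            simp [pvStepB, hp']
          rw [hstep]
          obtain ⟨h1, h2⟩ := ih (accL ++ [l]) accT seenL seenT (some true)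
            (fun _ => hL rfl) (by simp)
          refine ⟨?_, by simp [h2, pvSec_cons, hne.2]⟩
          rw [h1, List.takeWhile_cons, if_pos hp]
          simp
    · have hp' : PySem.Chars.startswith l.toList ['-', ' '] = false := by
        simpa [pvPred] using hp
      have hstep0 : pvStepB (accL, accT, seenL, seenT, cur) l
          = (if l == "Level:" && !seenL then (accL, accT, true, seenT, some true)
             else if l == "Move Shop:" && !seenT then (accL, accT, seenL, true, some false)
             else (accL, accT, seenL, seenT, none)) := by
        simp [pvStepB, hp']
      by_cases hA : (l == "Level:" && !seenL) = true
      · obtain ⟨hl, hsl⟩ : l = "Level:" ∧ seenL = false := by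
          simpa using hA
        subst hl
        have hcur : cur ≠ some true := fun h => by simp [hL h] at hsl
        rw [hstep0, if_pos hA]
        obtain ⟨h1, h2⟩ := ih accL accT true seenT (some true) (fun _ => rfl) (by simp)
        constructor
        · rw [h1]
          rcases cur with _ | b
          · simp [hsl, pvSec_cons]
          · cases b
            · simp [hsl, pvSec_cons]
            · exact absurd rfl hcur
        · rw [h2]
          rcases cur with _ | b
          · simp [pvSec_cons]
          · cases b
            · simp [hT rfl, hfL]
            · exact absurd rfl hcur
      · by_cases hB : (l == "Move Shop:" && !seenT) = true
        · obtain ⟨hl, hst⟩ : l = "Move Shop:" ∧ seenT = false := by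
            simpa using hB
          subst hl
          have hcur : cur ≠ some false := fun h => by simp [hT h] at hst
          rw [hstep0, if_neg hA, if_pos hB]
          obtain ⟨h1, h2⟩ := ih accL accT seenL true (some false) (by simp) (fun _ => rfl)
          constructor
          · rw [h1]
            rcases cur with _ | b
            · simp [pvSec_cons]
            · cases b
              · exact absurd rfl hcur
              · simp [hL rfl, hfT]
          · rw [h2]
            rcases cur with _ | b
            · simp [hst, pvSec_cons]
            · cases b
              · exact absurd rfl hcur
              · simp [hst, pvSec_cons]
        · rw [hstep0, if_neg hA, if_neg hB]
          obtain ⟨h1, h2⟩ := ih accL accT seenL seenT none (by simp) (by simp)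
          constructor
          · rw [h1]
            rcases cur with _ | b
            · by_cases hsl : seenL
              · simp [hsl]
              · have hl : l ≠ "Level:" := by
                  intro h; subst h; simp [hsl] at hA
                simp [hsl, pvSec_cons, hl]
            · cases b
              · by_cases hsl : seenL
                · simp [hsl]
                · have hl : l ≠ "Level:" := by
                    intro h; subst h; simp [hsl] at hA
                  simp [hsl, pvSec_cons, hl]
              · simp [hL rfl, hp]
          · rw [h2]
            rcases cur with _ | b
            · by_cases hst : seenT
              · simp [hst]
              · have hl : l ≠ "Move Shop:" := by
                  intro h; subst h; simp [hst] at hB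
                simp [hst, pvSec_cons, hl]
            · cases b
              · simp [hT rfl, hp]
              · by_cases hst : seenT
                · simp [hst]
                · have hl : l ≠ "Move Shop:" := by
                    intro h; subst h; simp [hst] at hB
                  simp [hst, pvSec_cons, hl]

-- ===== VERDICT (by name: the statement is the Claim_ definition above) =====
theorem split_moves_spec : Claim_equal_split_moves := by
  intro lines _
  unfold Spec_split_moves split_moves split_moves_alt
  obtain ⟨h1, h2⟩ := pvRunB lines [] [] false false none (by simp) (by simp)
  simp only [pvSectionA_eq]
  simp [h1, h2]
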